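-- pv_equiv track=rewrite | github.com/Simacoder/study_group | chapter_13/solutions/R-13-1.py | prefixes_that_are_suffixes
-- ===== SOURCE A (Python) =====
-- def prefixes_that_are_suffixes(P):
--     length = len(P)
--     prefixes_suffixes = []
--
--     for i in range(1, length + 1):
--         prefix = P[:i]
--         suffix = P[-i:]
--         if prefix == suffix:
--             prefixes_suffixes.append(prefix)
--
--     return prefixes_suffixes
-- ===== SOURCE B (Python) =====
-- def prefixes_that_are_suffixes(P):
--     # Chain of borders: the longest border of P, then the longest border of that
--     # border, and so on; every prefix-that-is-a-suffix arises this way.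
--     res = []
--     k = len(P)
--     while k > 0:
--         res.append(P[:k])
--         b = 0
--         for j in range(k - 1, 0, -1):
--             if P[:j] == P[k - j:k]:
--                 b = j
--                 break
--         k = b
--     return res[::-1]
-- ===== Notes on version B (the rewrite author's own statement) =====
-- stated objective: alternative
-- what changed: Instead of scanning all n prefix lengths and testing each prefix against the matching suffix, B walks the descending chain of longest borders (the longest proper border of P, then of that border, ...), collecting each and reversing at the end; correctness rests on the nesting of borders.
import Mathlib
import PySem

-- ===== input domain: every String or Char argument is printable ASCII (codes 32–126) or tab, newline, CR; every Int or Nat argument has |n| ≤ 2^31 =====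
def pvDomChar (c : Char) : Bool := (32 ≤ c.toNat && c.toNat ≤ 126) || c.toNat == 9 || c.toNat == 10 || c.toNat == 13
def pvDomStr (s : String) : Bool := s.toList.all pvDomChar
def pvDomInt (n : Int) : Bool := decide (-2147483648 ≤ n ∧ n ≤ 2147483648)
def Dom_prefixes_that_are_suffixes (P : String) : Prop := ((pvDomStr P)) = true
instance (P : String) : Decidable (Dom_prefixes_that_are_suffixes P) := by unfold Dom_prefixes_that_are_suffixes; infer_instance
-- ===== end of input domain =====

-- B replaces A's scan over all n prefix lengths by the descending chain of longest
-- borders (each border of P is a border of the next-longer one), collected and reversed: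
-- a genuinely different traversal of the same answer (objective: alternative).

-- ===== PORT A =====
def prefixes_that_are_suffixes (P : String) : List String :=
  let length := PySem.Str.len P
  (PySem.List.pyRange 1 (length + 1)).foldl
    (fun acc i =>
      let pref := PySem.Str.slice P none (some i)
      let suff := PySem.Str.slice P (some (-i)) none
      if pref == suff then acc ++ [pref] else acc) []

-- ===== PORT B =====
-- inner 'for j in range(k-1, 0, -1): … break' of Source B: first j ≤ start with P[:j] == P[k-j:k], else 0
def pvFindBorder (P : String) (k : Nat) : Nat → Nat
  | 0 => 0
  | j + 1 =>
    if PySem.Str.slice P none (some ((j : Int) + 1)) ==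
        PySem.Str.slice P (some ((k : Int) - ((j : Int) + 1))) (some (k : Int)) then j + 1
    else pvFindBorder P k j

theorem pvFindBorder_le (P : String) (k : Nat) : ∀ j, pvFindBorder P k j ≤ j := by
  intro j
  induction j with
  | zero => simp [pvFindBorder]
  | succ j ih => unfold pvFindBorder; split <;> omega

-- the 'while k > 0' loop of Source B, as recursion on k (k strictly decreases)
def pvChain (P : String) : Nat → List String
  | 0 => []
  | k + 1 => PySem.Str.slice P none (some ((k : Int) + 1)) :: pvChain P (pvFindBorder P (k + 1) k)
decreasing_by exact Nat.lt_succ_of_le (pvFindBorder_le P (k + 1) k)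

def prefixes_that_are_suffixes_alt (P : String) : List String :=
  (pvChain P P.toList.length).reverse

-- ===== PRECONDITION & SPEC =====
def Spec_prefixes_that_are_suffixes (P : String) (out : List String) : Prop := out = prefixes_that_are_suffixes_alt P
instance (P : String) (out : List String) : Decidable (Spec_prefixes_that_are_suffixes P out) := by unfold Spec_prefixes_that_are_suffixes; infer_instance

-- ===== CLAIM (what is proved, stated in full; the proofs are below) =====
def Claim_equal_prefixes_that_are_suffixes : Prop := ∀ (P : String), Dom_prefixes_that_are_suffixes P → Spec_prefixes_that_are_suffixes P (prefixes_that_are_suffixes P)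

-- ===== LEMMAS AND PROOFS =====

-- 'i is a border length of the length-k prefix of cs'
def pvQb (cs : List Char) (k i : Nat) : Bool := cs.take i == (cs.take k).drop (k - i)

theorem pvQb_self (cs : List Char) (k : Nat) : pvQb cs k k = true := by
  simp [pvQb]

-- nesting: below a border b of the k-prefix, borders of the k-prefix and of the b-prefix agree
theorem pvQb_nest (cs : List Char) {k b i : Nat} (hib : i ≤ b) (hbk : b ≤ k)
    (hQ : pvQb cs k b = true) : pvQb cs k i = pvQb cs b i := by
  simp only [pvQb, beq_iff_eq] at *
  rw [show (cs.take b).drop (b - i) = (cs.take k).drop (k - i) by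
    rw [hQ, List.drop_drop, show k - b + (b - i) = k - i by omega]]

theorem pvQb_sliceTest (P : String) {k i : Nat} (hik : i ≤ k) (hi : 0 < i) :
    (PySem.Str.slice P none (some (i : Int)) ==
      PySem.Str.slice P (some ((k : Int) - (i : Int))) (some (k : Int)))
      = pvQb P.toList k i := by
  have hc : ((k : Int) - (i : Int)) = ((k - i : Nat) : Int) := by omega
  rw [show (PySem.Str.slice P none (some (i : Int)) ==
      PySem.Str.slice P (some ((k : Int) - (i : Int))) (some (k : Int)))
      = (((PySem.Str.slice P none (some (i : Int))).toList : List Char) ==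
        (PySem.Str.slice P (some ((k : Int) - (i : Int))) (some (k : Int))).toList) by
    simp [String.ext_iff]]
  simp only [PySem.Str.toList_slice, PySem.Chars.slice_eq_listSlice, hc,
    PySem.List.slice_to_natCast, PySem.List.slice_natCast, pvQb]
  rw [List.drop_take, show k - (k - i) = i by omega]

-- spec of pvFindBorder: it is a border, and maximal among 1..j
theorem pvFindBorder_spec (P : String) (k : Nat) :
    ∀ j, j < k →
      (∀ i, pvFindBorder P k j < i → i ≤ j → pvQb P.toList k i = false) ∧
      (pvFindBorder P k j ≠ 0 → pvQb P.toList k (pvFindBorder P k j) = true) := by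
  intro j
  induction j with
  | zero => intro _; exact ⟨by omega, by simp [pvFindBorder]⟩
  | succ j ih =>
    intro hj
    have hQ := pvQb_sliceTest P (show j + 1 ≤ k by omega) (by omega)
    rw [show (((j + 1 : Nat)) : Int) = ((j : Int) + 1) by push_cast; ring] at hQ
    unfold pvFindBorder
    rw [hQ]
    by_cases h : pvQb P.toList k (j + 1) = true
    · rw [if_pos h]
      exact ⟨fun i h1 h2 => by omega, fun _ => h⟩
    · have h' : pvQb P.toList k (j + 1) = false := by simp_all
      simp only [h']
      obtain ⟨ih1, ih2⟩ := ih (by omega)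
      refine ⟨fun i h1 h2 => ?_, ih2⟩
      rcases Nat.lt_or_ge i (j + 1) with hlt | hge
      · exact ih1 i h1 (by omega)
      · rw [show i = j + 1 by omega]; exact h'

def pvBorders (cs : List Char) (k : Nat) : List Nat :=
  (List.range' 1 k).filter (pvQb cs k)

theorem pvChain_eq (P : String) :
    ∀ k, pvChain P k = ((pvBorders P.toList k).map (fun i => String.ofList (P.toList.take i))).reverse := by
  intro k
  induction k using Nat.strong_induction_on with
  | _ k ih =>
    match k with
    | 0 => simp [pvChain, pvBorders]
    | k + 1 =>
      set b := pvFindBorder P (k + 1) k with hb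
      obtain ⟨hmax, hQ⟩ := pvFindBorder_spec P (k + 1) k (by omega)
      rw [← hb] at hmax hQ
      have hble : b ≤ k := hb ▸ pvFindBorder_le P (k + 1) k
      have hsplit : pvBorders P.toList (k + 1) = pvBorders P.toList b ++ [k + 1] := by
        unfold pvBorders
        rw [List.range'_1_concat, List.filter_append, show 1 + k = k + 1 by omega]
        have hlast : List.filter (pvQb P.toList (k + 1)) [k + 1] = [k + 1] := by
          simp [pvQb_self]
        rw [hlast]
        congr 1
        have h2 : List.filter (pvQb P.toList (k + 1)) (List.range' (1 + b) (k - b)) = [] := by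
          rw [List.filter_eq_nil_iff]
          intro i hi
          rw [List.mem_range'] at hi
          simp [hmax i (by omega) (by omega)]
        have hr : List.range' 1 k = List.range' 1 b ++ List.range' (1 + b) (k - b) := by
          rw [List.range'_append_1]; congr 1; omega
        rw [hr, List.filter_append, h2, List.append_nil]
        match hbz : b with
        | 0 => simp
        | b' + 1 =>
          apply List.filter_congr
          intro i hi
          rw [List.mem_range'] at hi
          exact pvQb_nest P.toList (by omega) (by omega)
            (hQ (Nat.succ_ne_zero b'))
      rw [hsplit]
      unfold pvChain
      rw [ih b (by omega)]
      have hhead : PySem.Str.slice P none (some ((k : Int) + 1))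
          = String.ofList (P.toList.take (k + 1)) := by
        have hsl : PySem.List.slice P.toList none (some ((k : Int) + 1)) = P.toList.take (k + 1) := by
          rw [show ((k : Int) + 1) = ((k + 1 : Nat) : Int) by push_cast; ring,
            PySem.List.slice_to_natCast]
        simp [PySem.Str.slice, PySem.Chars.slice_eq_listSlice, hsl]
      simp [hhead]

theorem pvA_eq (P : String) :
    prefixes_that_are_suffixes P
      = (pvBorders P.toList P.toList.length).map (fun i => String.ofList (P.toList.take i)) := by
  set cs := P.toList with hcs
  set n := cs.length with hn
  simp only [prefixes_that_are_suffixes, PySem.Str.len_eq, ← hcs, ← hn]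
  rw [PySem.List.pyRange_one, show ((n : Int) + 1 - 1).toNat = n by omega, List.foldl_map]
  have hfun : (fun (acc : List String) (x : Nat) =>
      let i : Int := 1 + (x : Int)
      let pref := PySem.Str.slice P none (some i)
      let suff := PySem.Str.slice P (some (-i)) none
      if pref == suff then acc ++ [pref] else acc)
      = (fun acc x => if pvQb cs n (x + 1) then acc ++ [String.ofList (cs.take (x + 1))] else acc) := by
    funext acc x
    have hc : (1 + (x : Int)) = ((x + 1 : Nat) : Int) := by push_cast; ring
    have hpre : PySem.Str.slice P none (some (1 + (x : Int))) = String.ofList (cs.take (x + 1)) := by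
      have hsl : PySem.List.slice P.toList none (some (1 + (x : Int))) = P.toList.take (x + 1) := by
        rw [hc, PySem.List.slice_to_natCast]
      simp [PySem.Str.slice, PySem.Chars.slice_eq_listSlice, hsl, hcs]
    have htest : (PySem.Str.slice P none (some (1 + (x : Int))) ==
        PySem.Str.slice P (some (-(1 + (x : Int)))) none) = pvQb cs n (x + 1) := by
      rw [show (PySem.Str.slice P none (some (1 + (x : Int))) ==
          PySem.Str.slice P (some (-(1 + (x : Int)))) none)
          = ((PySem.Str.slice P none (some (1 + (x : Int)))).toList ==
            (PySem.Str.slice P (some (-(1 + (x : Int)))) none).toList) by simp [String.ext_iff]]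
      simp only [PySem.Str.toList_slice, PySem.Chars.slice_eq_listSlice, hc,
        PySem.List.slice_to_natCast,
        PySem.List.slice_from_neg_natCast P.toList (x + 1) (by omega)]
      simp only [pvQb]
      rw [hn, List.take_length]
    show (if (PySem.Str.slice P none (some (1 + (x : Int))) ==
        PySem.Str.slice P (some (-(1 + (x : Int)))) none) = true then
        acc ++ [PySem.Str.slice P none (some (1 + (x : Int)))] else acc)
      = if pvQb cs n (x + 1) = true then acc ++ [String.ofList (cs.take (x + 1))] else acc
    rw [htest, hpre]
  rw [hfun, PySem.List.foldl_append_if (fun x => pvQb cs n (x + 1))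
    (fun x => String.ofList (cs.take (x + 1))) (List.range n) []]
  unfold pvBorders
  rw [List.range'_eq_map_range, List.filter_map, List.map_map]
  simp only [List.nil_append, Function.comp_def]
  simp [Nat.add_comm]

-- ===== VERDICT (by name: the statement is the Claim_ definition above) =====
theorem prefixes_that_are_suffixes_spec : Claim_equal_prefixes_that_are_suffixes := by
  intro P _
  unfold Spec_prefixes_that_are_suffixes prefixes_that_are_suffixes_alt
  rw [pvA_eq, pvChain_eq, List.reverse_reverse]
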